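-- pv_equiv track=rewrite | github.com/CkaL812/TrapDom | trapApp/tagger/tag_definitions.py | compute_age_ranges
-- ===== SOURCE A (Python) =====
-- STYLE_AGE_BASE = {
--     'minimalism':    ['25-34', '35-44', '45-54'],
--     'old_money':     ['25-34', '35-44', '45-54', '55+'],
--     'streetwear':    ['13-17', '18-24', '25-34'],
--     'gorpcore':      ['18-24', '25-34', '35-44'],
--     'grunge':        ['18-24', '25-34'],
--     'cyberpunk':     ['18-24', '25-34'],
--     'vintage':       ['18-24', '25-34', '35-44'],
--     'dark_academia': ['18-24', '25-34', '35-44'],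
--     'avant_garde':   ['25-34', '35-44'],
--     'workwear':      ['25-34', '35-44', '45-54'],
-- }
--
-- FORMALITY_AGE_SHIFT = {
--     'white_tie':          ['35-44', '45-54', '55+'],
--     'black_tie':          ['25-34', '35-44', '45-54', '55+'],
--     'black_tie_creative': ['25-34', '35-44'],
--     'business_formal':    ['25-34', '35-44', '45-54', '55+'],
--     'business_casual':    ['25-34', '35-44', '45-54'],
--     'smart_casual':       ['18-24', '25-34', '35-44'],
--     'cocktail':           ['25-34', '35-44', '45-54'],
--     'after_five':         ['25-34', '35-44'],
--     'festival_chic':      ['13-17', '18-24', '25-34'],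
--     'semi_formal':        ['25-34', '35-44', '45-54'],
-- }
--
-- DEFAULT_AGE_RANGES = ['18-24', '25-34', '35-44']
--
-- def compute_age_ranges(styles, formality):
--     """
--     Повертає віковий діапазон на основі стилів і дрес-коду.
--     Беремо перетин множин (якщо можливо), інакше об'єднання.
--     """
--     sets = []
--
--     if styles:
--         for s in styles:
--             if s in STYLE_AGE_BASE:
--                 sets.append(set(STYLE_AGE_BASE[s]))
--
--     if formality and formality in FORMALITY_AGE_SHIFT:
--         sets.append(set(FORMALITY_AGE_SHIFT[formality]))
--
--     if not sets:
--         return list(DEFAULT_AGE_RANGES)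
--
--     # Пробуємо перетин (більш точно)
--     intersection = sets[0]
--     for s in sets[1:]:
--         intersection = intersection & s
--
--     if intersection:
--         result = sorted(intersection)
--     else:
--         # Перетину немає — беремо об'єднання
--         union = set()
--         for s in sets:
--             union |= s
--         result = sorted(union)
--
--     # Сортуємо за логічним порядком вікових діапазонів
--     order = ['13-17', '18-24', '25-34', '35-44', '45-54', '55+']
--     return [r for r in order if r in result]
-- ===== SOURCE B (Python) =====
-- STYLE_AGE_BASE = {
--     'minimalism':    ['25-34', '35-44', '45-54'],
--     'old_money':     ['25-34', '35-44', '45-54', '55+'],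
--     'streetwear':    ['13-17', '18-24', '25-34'],
--     'gorpcore':      ['18-24', '25-34', '35-44'],
--     'grunge':        ['18-24', '25-34'],
--     'cyberpunk':     ['18-24', '25-34'],
--     'vintage':       ['18-24', '25-34', '35-44'],
--     'dark_academia': ['18-24', '25-34', '35-44'],
--     'avant_garde':   ['25-34', '35-44'],
--     'workwear':      ['25-34', '35-44', '45-54'],
-- }
--
-- FORMALITY_AGE_SHIFT = {
--     'white_tie':          ['35-44', '45-54', '55+'],
--     'black_tie':          ['25-34', '35-44', '45-54', '55+'],
--     'black_tie_creative': ['25-34', '35-44'],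
--     'business_formal':    ['25-34', '35-44', '45-54', '55+'],
--     'business_casual':    ['25-34', '35-44', '45-54'],
--     'smart_casual':       ['18-24', '25-34', '35-44'],
--     'cocktail':           ['25-34', '35-44', '45-54'],
--     'after_five':         ['25-34', '35-44'],
--     'festival_chic':      ['13-17', '18-24', '25-34'],
--     'semi_formal':        ['25-34', '35-44', '45-54'],
-- }
--
-- DEFAULT_AGE_RANGES = ['18-24', '25-34', '35-44']
--
-- AGE_ORDER = ['13-17', '18-24', '25-34', '35-44', '45-54', '55+']
--
--
-- def compute_age_ranges(styles, formality):
--     """Count, for each canonical age range, how many collected groups contain it;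
--     ranges present in every group form the intersection, ranges present in any
--     group form the union fallback. Scanning AGE_ORDER directly yields the
--     result already in canonical order, with no set algebra and no sort."""
--     groups = []
--     for s in styles:
--         if s in STYLE_AGE_BASE:
--             groups.append(STYLE_AGE_BASE[s])
--     if formality and formality in FORMALITY_AGE_SHIFT:
--         groups.append(FORMALITY_AGE_SHIFT[formality])
--     if not groups:
--         return list(DEFAULT_AGE_RANGES)
--     counts = [sum(1 for g in groups if r in g) for r in AGE_ORDER]
--     inter = [r for r, c in zip(AGE_ORDER, counts) if c == len(groups)]
--     if inter:
--         return inter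
--     return [r for r, c in zip(AGE_ORDER, counts) if c >= 1]
-- ===== Notes on version B (the rewrite author's own statement) =====
-- stated objective: alternative
-- what changed: Instead of folding sets with & and falling back to a | fold plus a sort, B collects the raw lookup lists, counts for each of the six canonical ranges in how many groups it occurs, and emits in canonical-order scan the ranges with count == len(groups) (intersection) or, if none, count >= 1 (union), needing no set algebra and no sorted().
import Mathlib
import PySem

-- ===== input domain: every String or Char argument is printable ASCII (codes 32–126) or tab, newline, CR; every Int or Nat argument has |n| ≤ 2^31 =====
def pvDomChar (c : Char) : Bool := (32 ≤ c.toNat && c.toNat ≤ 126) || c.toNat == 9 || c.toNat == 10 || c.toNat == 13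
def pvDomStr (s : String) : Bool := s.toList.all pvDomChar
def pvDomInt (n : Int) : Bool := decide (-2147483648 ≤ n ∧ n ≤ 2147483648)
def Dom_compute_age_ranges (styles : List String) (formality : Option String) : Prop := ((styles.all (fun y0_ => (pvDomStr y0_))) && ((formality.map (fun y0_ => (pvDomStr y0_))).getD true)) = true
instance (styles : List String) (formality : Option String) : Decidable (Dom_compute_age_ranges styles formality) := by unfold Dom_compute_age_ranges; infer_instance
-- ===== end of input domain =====

-- B replaces A's set-intersection/union folds plus sorted() by a single canonical-order scan
-- counting per-range group membership (alternative decomposition, same cost).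


-- ===== PORT A =====
-- module constants (shared by both ports)
def styleAgeBase : PySem.Dict String (List String) := PySem.Dict.ofList [
  ("minimalism",    ["25-34", "35-44", "45-54"]),
  ("old_money",     ["25-34", "35-44", "45-54", "55+"]),
  ("streetwear",    ["13-17", "18-24", "25-34"]),
  ("gorpcore",      ["18-24", "25-34", "35-44"]),
  ("grunge",        ["18-24", "25-34"]),
  ("cyberpunk",     ["18-24", "25-34"]),
  ("vintage",       ["18-24", "25-34", "35-44"]),
  ("dark_academia", ["18-24", "25-34", "35-44"]),
  ("avant_garde",   ["25-34", "35-44"]),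
  ("workwear",      ["25-34", "35-44", "45-54"])]

def formalityAgeShift : PySem.Dict String (List String) := PySem.Dict.ofList [
  ("white_tie",          ["35-44", "45-54", "55+"]),
  ("black_tie",          ["25-34", "35-44", "45-54", "55+"]),
  ("black_tie_creative", ["25-34", "35-44"]),
  ("business_formal",    ["25-34", "35-44", "45-54", "55+"]),
  ("business_casual",    ["25-34", "35-44", "45-54"]),
  ("smart_casual",       ["18-24", "25-34", "35-44"]),
  ("cocktail",           ["25-34", "35-44", "45-54"]),
  ("after_five",         ["25-34", "35-44"]),
  ("festival_chic",      ["13-17", "18-24", "25-34"]),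
  ("semi_formal",        ["25-34", "35-44", "45-54"])]

def defaultAgeRanges : List String := ["18-24", "25-34", "35-44"]

-- the 'order' literal of A's last line (also B's AGE_ORDER)
def ageOrder : List String := ["13-17", "18-24", "25-34", "35-44", "45-54", "55+"]

-- body of A's 'for s in styles' loop: if s in STYLE_AGE_BASE: sets.append(set(STYLE_AGE_BASE[s]))
def stepA (acc : List (PySem.Set String)) (s : String) : List (PySem.Set String) :=
  if styleAgeBase.contains s then acc ++ [PySem.Set.ofList (styleAgeBase.getD s [])] else acc

-- A's collection of 'sets' (the two appending phases)
def collectA (styles : List String) (formality : Option String) : List (PySem.Set String) :=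
  let sets : List (PySem.Set String) := if styles.isEmpty then [] else styles.foldl stepA []
  match formality with
  | none => sets
  | some f =>
      if (f != "") && formalityAgeShift.contains f
      then sets ++ [PySem.Set.ofList (formalityAgeShift.getD f [])]
      else sets

def compute_age_ranges (styles : List String) (formality : Option String) : List String :=
  let sets := collectA styles formality
  match sets with
  | [] => defaultAgeRanges
  | s0 :: rest =>
      let inter := rest.foldl PySem.Set.inter s0
      let result :=
        if !inter.isEmpty then
          PySem.List.sorted inter (fun x => x) false
        else
          PySem.List.sorted ((s0 :: rest).foldl (fun u s => PySem.Set.union u s)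
            (PySem.Set.empty : PySem.Set String)) (fun x => x) false
      ageOrder.filter (fun r => result.contains r)

-- ===== PORT B =====
-- body of B's 'for s in styles' loop: appends the raw list, no set()
def stepB (acc : List (List String)) (s : String) : List (List String) :=
  if styleAgeBase.contains s then acc ++ [styleAgeBase.getD s []] else acc

-- B's collection of 'groups'
def collectB (styles : List String) (formality : Option String) : List (List String) :=
  let groups := styles.foldl stepB []
  match formality with
  | none => groups
  | some f =>
      if (f != "") && formalityAgeShift.contains f
      then groups ++ [formalityAgeShift.getD f []]
      else groups

def compute_age_ranges_alt (styles : List String) (formality : Option String) : List String :=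
  let groups := collectB styles formality
  if groups.isEmpty then defaultAgeRanges
  else
    let counts := ageOrder.map (fun r => groups.countP (fun g => g.contains r))
    let inter := (ageOrder.zip counts).filterMap
      (fun rc => if rc.2 = groups.length then some rc.1 else none)
    if !inter.isEmpty then inter
    else (ageOrder.zip counts).filterMap (fun rc => if 1 ≤ rc.2 then some rc.1 else none)

-- ===== PRECONDITION & SPEC =====
def Spec_compute_age_ranges (styles : List String) (formality : Option String) (out : List String) : Prop := out = compute_age_ranges_alt styles formality
instance (styles : List String) (formality : Option String) (out : List String) : Decidable (Spec_compute_age_ranges styles formality out) := by unfold Spec_compute_age_ranges; infer_instance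

-- ===== CLAIM (what is proved, stated in full; the proofs are below) =====
def Claim_equal_compute_age_ranges : Prop := ∀ (styles : List String) (formality : Option String), Dom_compute_age_ranges styles formality → Spec_compute_age_ranges styles formality (compute_age_ranges styles formality)

-- ===== LEMMAS AND PROOFS =====

-- A's sets are exactly B's groups, each turned into a set
theorem foldl_stepA_map (styles : List String) (acc : List (List String)) :
    styles.foldl stepA (acc.map PySem.Set.ofList) = (styles.foldl stepB acc).map PySem.Set.ofList := by
  induction styles generalizing acc with
  | nil => rfl
  | cons s t ih =>
    simp only [List.foldl_cons, stepA, stepB]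
    by_cases h : styleAgeBase.contains s
    · simp only [h, if_pos]
      rw [show acc.map PySem.Set.ofList ++ [PySem.Set.ofList (styleAgeBase.getD s [])]
            = (acc ++ [styleAgeBase.getD s []]).map PySem.Set.ofList by simp]
      exact ih _
    · simp only [h, if_neg, Bool.false_eq_true, not_false_iff]
      exact ih acc

theorem collectA_eq_map (styles : List String) (formality : Option String) :
    collectA styles formality = (collectB styles formality).map PySem.Set.ofList := by
  unfold collectA collectB
  have hbase : (if styles.isEmpty then ([] : List (PySem.Set String)) else styles.foldl stepA [])
      = (styles.foldl stepB []).map PySem.Set.ofList := by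
    cases styles with
    | nil => rfl
    | cons s t => simpa using foldl_stepA_map (s :: t) []
  simp only [List.isEmpty_iff] at hbase
  cases formality with
  | none => simpa using hbase
  | some f =>
    by_cases h : ((f != "") && formalityAgeShift.contains f) = true <;>
      simp [h, hbase, List.map_append]

-- every group B collects is a dict value, hence a subset of ageOrder
theorem styleAgeBase_getD_subset (s : String) :
    ∀ x ∈ styleAgeBase.getD s [], x ∈ ageOrder := by
  have hd : styleAgeBase = PySem.Dict.mk [
    ("minimalism",    ["25-34", "35-44", "45-54"]),
    ("old_money",     ["25-34", "35-44", "45-54", "55+"]),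
    ("streetwear",    ["13-17", "18-24", "25-34"]),
    ("gorpcore",      ["18-24", "25-34", "35-44"]),
    ("grunge",        ["18-24", "25-34"]),
    ("cyberpunk",     ["18-24", "25-34"]),
    ("vintage",       ["18-24", "25-34", "35-44"]),
    ("dark_academia", ["18-24", "25-34", "35-44"]),
    ("avant_garde",   ["25-34", "35-44"]),
    ("workwear",      ["25-34", "35-44", "45-54"])] := by decide
  rw [hd, PySem.Dict.getD_eq_get?_getD]
  simp only [PySem.Dict.get?_mk_cons, ageOrder]
  split_ifs <;> first | (intro x hx; simp at hx ⊢; simp_all; tauto) | simp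

theorem formalityAgeShift_getD_subset (s : String) :
    ∀ x ∈ formalityAgeShift.getD s [], x ∈ ageOrder := by
  have hd : formalityAgeShift = PySem.Dict.mk [
    ("white_tie",          ["35-44", "45-54", "55+"]),
    ("black_tie",          ["25-34", "35-44", "45-54", "55+"]),
    ("black_tie_creative", ["25-34", "35-44"]),
    ("business_formal",    ["25-34", "35-44", "45-54", "55+"]),
    ("business_casual",    ["25-34", "35-44", "45-54"]),
    ("smart_casual",       ["18-24", "25-34", "35-44"]),
    ("cocktail",           ["25-34", "35-44", "45-54"]),
    ("after_five",         ["25-34", "35-44"]),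
    ("festival_chic",      ["13-17", "18-24", "25-34"]),
    ("semi_formal",        ["25-34", "35-44", "45-54"])] := by decide
  rw [hd, PySem.Dict.getD_eq_get?_getD]
  simp only [PySem.Dict.get?_mk_cons, ageOrder]
  split_ifs <;> first | (intro x hx; simp at hx ⊢; simp_all; tauto) | simp

theorem foldl_stepB_subset (styles : List String) (acc : List (List String))
    (hacc : ∀ g ∈ acc, ∀ x ∈ g, x ∈ ageOrder) :
    ∀ g ∈ styles.foldl stepB acc, ∀ x ∈ g, x ∈ ageOrder := by
  induction styles generalizing acc with
  | nil => exact hacc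
  | cons s t ih =>
    simp only [List.foldl_cons, stepB]
    by_cases h : styleAgeBase.contains s
    · simp only [h, if_pos]
      refine ih _ ?_
      intro g hg
      rcases List.mem_append.mp hg with hg | hg
      · exact hacc g hg
      · simp at hg; subst hg; exact styleAgeBase_getD_subset s
    · simp only [h, if_neg, Bool.false_eq_true, not_false_iff]
      exact ih acc hacc

theorem collectB_subset (styles : List String) (formality : Option String) :
    ∀ g ∈ collectB styles formality, ∀ x ∈ g, x ∈ ageOrder := by
  unfold collectB
  have hbase := foldl_stepB_subset styles [] (by simp)
  cases formality with
  | none => simpa using hbase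
  | some f =>
    by_cases h : ((f != "") && formalityAgeShift.contains f) = true
    · simp only [h, if_pos]
      intro g hg
      rcases List.mem_append.mp hg with hg | hg
      · exact hbase g hg
      · simp at hg; subst hg; exact formalityAgeShift_getD_subset f
    · simp only [h, if_neg, Bool.false_eq_true, not_false_iff]
      exact hbase

theorem mem_foldl_inter (rest : List (PySem.Set String)) (s0 : PySem.Set String) (r : String) :
    r ∈ rest.foldl PySem.Set.inter s0 ↔ r ∈ s0 ∧ ∀ s ∈ rest, r ∈ s := by
  induction rest generalizing s0 with
  | nil => simp
  | cons a t ih => simp [List.foldl_cons, ih, PySem.Set.mem_inter]; tauto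

theorem mem_foldl_union (sets : List (PySem.Set String)) (init : PySem.Set String) (r : String) :
    r ∈ sets.foldl (fun u s => PySem.Set.union u s) init ↔ r ∈ init ∨ ∃ s ∈ sets, r ∈ s := by
  induction sets generalizing init with
  | nil => simp
  | cons a t ih => simp [List.foldl_cons, ih, PySem.Set.mem_union]; tauto

theorem zip_map_filterMap (xs : List String) (f : String → Nat) (p : Nat → Prop) [DecidablePred p] :
    (xs.zip (xs.map f)).filterMap (fun rc => if p rc.2 then some rc.1 else none)
      = xs.filter (fun r => decide (p (f r))) := by
  induction xs with
  | nil => rfl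
  | cons x t ih =>
    simp only [List.map_cons, List.zip_cons_cons, List.filterMap_cons, List.filter_cons]
    by_cases h : p (f x) <;> simp [h, ih]

-- ===== VERDICT (by name: the statement is the Claim_ definition above) =====
theorem compute_age_ranges_spec : Claim_equal_compute_age_ranges := by
  intro styles formality _
  unfold Spec_compute_age_ranges compute_age_ranges compute_age_ranges_alt
  rw [collectA_eq_map]
  cases hg : collectB styles formality with
  | nil => rfl
  | cons g0 gs =>
    have hsub := collectB_subset styles formality
    rw [hg] at hsub
    simp only [List.map_cons]
    have hmemI : ∀ r : String,
        r ∈ (gs.map PySem.Set.ofList).foldl PySem.Set.inter (PySem.Set.ofList g0) ↔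
          (g0 :: gs).countP (fun g => g.contains r) = (g0 :: gs).length := by
      intro r
      rw [mem_foldl_inter, List.countP_eq_length]
      simp [PySem.Set.mem_ofList]
    rw [zip_map_filterMap ageOrder (fun r => List.countP (fun g => g.contains r) (g0 :: gs))
          (fun c => c = (g0 :: gs).length),
        zip_map_filterMap ageOrder (fun r => List.countP (fun g => g.contains r) (g0 :: gs))
          (fun c => 1 ≤ c)]
    simp only [List.isEmpty_cons, if_neg Bool.false_ne_true]
    have hcond : (List.foldl PySem.Set.inter (PySem.Set.ofList g0) (List.map PySem.Set.ofList gs)).isEmpty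
        = (List.filter (fun r => decide (List.countP (fun g => g.contains r) (g0 :: gs) = (g0 :: gs).length)) ageOrder).isEmpty := by
      rw [Bool.eq_iff_iff]
      simp only [List.isEmpty_iff, List.eq_nil_iff_forall_not_mem, List.mem_filter,
        decide_eq_true_eq, not_and]
      constructor
      · intro h r hr hc
        exact h r ((hmemI r).2 hc)
      · intro h r hr
        have hcount := (hmemI r).1 hr
        have hg0 : r ∈ g0 := by
          have := (mem_foldl_inter _ _ r).1 hr
          exact (PySem.Set.mem_ofList _ _).1 this.1
        exact h r (hsub g0 (by simp) r hg0) hcount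
    rw [hcond]
    split
    · refine List.filter_congr ?_
      intro r _
      rw [Bool.eq_iff_iff]
      simp [PySem.List.mem_sorted, hmemI r]
    · refine List.filter_congr ?_
      intro r _
      rw [Bool.eq_iff_iff]
      simp [PySem.List.mem_sorted, mem_foldl_union, PySem.Set.mem_union,
        PySem.Set.mem_ofList, PySem.Set.empty]
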